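-- pv_equiv track=rewrite | github.com/softkleenex/coding_training | 백준/Gold/28423. 게임/게임.py | Nc
-- ===== SOURCE A (Python) =====
-- def Nc(N):
--     def Na(N):
--         N_str = (str(N))
--         ans = 0
--
--         for tempN in N_str:
--             ans += int(tempN)
--
--         return ans
--     def Nb(N):
--         N_str = (str(N))
--         ans = 1
--
--         for tempN in N_str:
--             ans *= int(tempN)
--
--         return ans
--
--     return int(str(Na(N)) + str(Nb(N)))
-- ===== SOURCE B (Python) =====
-- def Nc(N):
--     def go(n):
--         # digit sum and digit product of n (n >= 0), by recursive divmod -- no string traversal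
--         if n < 10:
--             return n, n
--         s, p = go(n // 10)
--         d = n % 10
--         return s + d, p * d
--     s, p = go(N)
--     return int(str(s) + str(p))
-- ===== Notes on version B (the rewrite author's own statement) =====
-- stated objective: alternative
-- what changed: B computes the digit sum and digit product purely arithmetically by recursive divmod on the integer (it never converts N to a string and has no per-character int() parsing), replacing A's two separate string traversals; only the final concatenate-and-int step is kept.
import Mathlib
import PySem

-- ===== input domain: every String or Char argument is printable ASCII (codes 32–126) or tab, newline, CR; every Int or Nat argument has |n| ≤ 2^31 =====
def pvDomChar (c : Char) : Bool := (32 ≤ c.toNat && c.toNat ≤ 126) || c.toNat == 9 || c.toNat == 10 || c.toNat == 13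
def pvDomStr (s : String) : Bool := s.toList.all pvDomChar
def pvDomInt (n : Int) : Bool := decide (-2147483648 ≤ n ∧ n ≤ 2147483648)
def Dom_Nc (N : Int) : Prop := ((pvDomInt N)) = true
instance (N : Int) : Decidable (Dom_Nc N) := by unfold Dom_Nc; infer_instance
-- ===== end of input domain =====

-- B replaces A's two string traversals with one arithmetic recursion (divmod) on the integer;
-- only the final int(str(s)+str(p)) step is shared (objective: alternative).
-- Pre_Nc excludes N < 0, where both A and B raise ValueError (A on int('-'), B on int('-s-p')).


-- ===== PORT A =====
-- int(ch) on a single char: exact on the digit characters reached under Pre_Nc (N ≥ 0)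
def pvDigit (c : Char) : Int := (PySem.Int.ofChars? [c]).getD 0

-- helper Na: for-loop over str(N) summing int(ch)
def Nc_Na (N : Int) : Int :=
  (PySem.Int.toChars N).foldl (fun ans c => ans + pvDigit c) 0

-- helper Nb: for-loop over str(N) multiplying int(ch)
def Nc_Nb (N : Int) : Int :=
  (PySem.Int.toChars N).foldl (fun ans c => ans * pvDigit c) 1

def Nc (N : Int) : Int :=
  -- int(str(Na(N)) + str(Nb(N))): under Pre_Nc both parts are nonnegative decimals, so getD 0 is exact
  (PySem.Int.ofStr? (PySem.Int.toStr (Nc_Na N) ++ PySem.Int.toStr (Nc_Nb N))).getD 0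

-- ===== PORT B =====
-- go(n): digit sum and product by recursive divmod, no string traversal of N
def pvGo (n : Int) : Int × Int :=
  if _h : n < 10 then (n, n)
  else
    let sp := pvGo (PySem.Int.floordiv n 10)
    let d := PySem.Int.mod n 10
    (sp.1 + d, sp.2 * d)
termination_by n.toNat
decreasing_by
  rw [PySem.Int.floordiv_eq_ediv_of_pos (by omega)]
  have h1 : n / 10 * 10 ≤ n := Int.ediv_mul_le n (by omega)
  have h0 : (1:Int) ≤ n / 10 := Int.le_ediv_iff_mul_le (by omega) |>.mpr (by omega)
  have h2 : n / 10 < n := by nlinarith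
  omega

def Nc_alt (N : Int) : Int :=
  let sp := pvGo N
  (PySem.Int.ofStr? (PySem.Int.toStr sp.1 ++ PySem.Int.toStr sp.2)).getD 0

-- ===== PRECONDITION & SPEC =====
-- Pre_Nc: 0 ≤ N; for negative N both Pythons raise ValueError (A on int('-'), B on the final int()).
def Pre_Nc (N : Int) : Prop := 0 ≤ N
instance (N : Int) : Decidable (Pre_Nc N) := by unfold Pre_Nc; infer_instance
def pvWitness_Nc : Int := (117)

def Spec_Nc (N : Int) (out : Int) : Prop := out = Nc_alt N
instance (N : Int) (out : Int) : Decidable (Spec_Nc N out) := by unfold Spec_Nc; infer_instance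

-- ===== CLAIM =====
def Claim_equal_Nc : Prop := ∀ (N : Int), Dom_Nc N → Pre_Nc N → Spec_Nc N (Nc N)

-- ===== LEMMAS AND PROOFS =====

theorem pvToDigitsCore_acc (f : Nat) : ∀ (n : Nat) (acc : List Char),
    Nat.toDigitsCore 10 f n acc = Nat.toDigitsCore 10 f n [] ++ acc := by
  induction f with
  | zero => intro n acc; simp [Nat.toDigitsCore]
  | succ f ih =>
    intro n acc
    simp only [Nat.toDigitsCore]
    by_cases h : n / 10 = 0
    · simp [h]
    · simp only [h, if_false]
      rw [ih (n / 10) (Nat.digitChar (n % 10) :: acc), ih (n / 10) [Nat.digitChar (n % 10)]]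
      simp

theorem pvToDigitsCore_fuel : ∀ (f₁ f₂ n : Nat), n < f₁ → n < f₂ →
    Nat.toDigitsCore 10 f₁ n [] = Nat.toDigitsCore 10 f₂ n [] := by
  intro f₁
  induction f₁ with
  | zero => intro f₂ n h; omega
  | succ f ih =>
    intro f₂ n h1 h2
    cases f₂ with
    | zero => omega
    | succ f₂ =>
      simp only [Nat.toDigitsCore]
      by_cases h : n / 10 = 0
      · simp [h]
      · simp only [h, if_false]
        have hn : 0 < n := by
          rcases Nat.eq_zero_or_pos n with h0 | h0
          · exfalso; apply h; simp [h0]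
          · exact h0
        have hd : n / 10 < n := Nat.div_lt_self hn (by omega)
        rw [pvToDigitsCore_acc, pvToDigitsCore_acc f₂]
        rw [ih f₂ (n / 10) (by omega) (by omega)]

theorem pvToDigits_lt (n : Nat) (h : n < 10) : Nat.toDigits 10 n = [Nat.digitChar n] := by
  simp [Nat.toDigits, Nat.toDigitsCore, Nat.div_eq_of_lt h, Nat.mod_eq_of_lt h]

theorem pvToDigits_rec (n : Nat) (h : 10 ≤ n) :
    Nat.toDigits 10 n = Nat.toDigits 10 (n / 10) ++ [Nat.digitChar (n % 10)] := by
  have hne : n / 10 ≠ 0 := by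
    intro h0; have := Nat.div_eq_of_lt (show n < 10 by omega); omega
  simp only [Nat.toDigits, Nat.toDigitsCore]
  simp only [hne, if_false]
  rw [pvToDigitsCore_acc]
  congr 1
  exact pvToDigitsCore_fuel n (n / 10 + 1) (n / 10)
    (Nat.div_lt_self (by omega) (by omega)) (by omega)

theorem pvDigit_digitChar (d : Nat) (h : d < 10) : pvDigit (Nat.digitChar d) = (d : Int) := by
  interval_cases d <;> decide

-- the arithmetic recursion computes exactly A's two folds over the digit string
theorem pvGo_eq_folds : ∀ (n : Nat),
    pvGo (n : Int) = ((Nat.toDigits 10 n).foldl (fun ans c => ans + pvDigit c) 0,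
                      (Nat.toDigits 10 n).foldl (fun ans c => ans * pvDigit c) 1) := by
  intro n
  induction n using Nat.strong_induction_on with
  | _ n ih =>
    by_cases h : n < 10
    · rw [pvGo, pvToDigits_lt n h]
      simp [h, pvDigit_digitChar n h]
    · rw [pvGo]
      simp only [show ¬((n:Int) < 10) by omega, dite_false]
      rw [show PySem.Int.floordiv (n : Int) 10 = ((n / 10 : Nat) : Int) by
            exact_mod_cast PySem.Int.floordiv_natCast n 10,
          show PySem.Int.mod (n : Int) 10 = ((n % 10 : Nat) : Int) by
            exact_mod_cast PySem.Int.mod_natCast n 10]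
      rw [ih (n / 10) (Nat.div_lt_self (by omega) (by omega))]
      rw [pvToDigits_rec n (by omega), List.foldl_append, List.foldl_append]
      simp [pvDigit_digitChar (n % 10) (Nat.mod_lt n (by omega))]

theorem pvToChars_natCast (n : Nat) : PySem.Int.toChars (n : Int) = Nat.toDigits 10 n := by
  simp [PySem.Int.toChars, show ¬((n:Int) < 0) by omega]

-- ===== VERDICT =====
theorem Nc_spec : Claim_equal_Nc := by
  intro N _ hpre
  unfold Spec_Nc Nc Nc_alt Nc_Na Nc_Nb
  obtain ⟨n, rfl⟩ : ∃ n : Nat, N = (n : Int) := ⟨N.toNat, (Int.toNat_of_nonneg hpre).symm⟩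
  rw [pvGo_eq_folds n, pvToChars_natCast n]
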